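-- pv_equiv track=rewrite | github.com/aidandelange170-hub/Zio-Booster | utils/optimizer.py | _is_system_critical_process
-- ===== SOURCE A (Python) =====
-- def _is_system_critical_process(process_name: str) -> bool:
--     """Check if a process is critical to system operation"""
--     critical_names = [
--         'systemd', 'kernel', 'kthreadd', 'init', 'explorer.exe', 'svchost.exe',
--         'wininit.exe', 'csrss.exe', 'lsass.exe', 'services.exe', 'dwm.exe',
--         'winlogon.exe', 'spoolsv.exe', 'taskhost.exe', 'smss.exe', 'csrss.exe'
--     ]
--
--     # Convert to lowercase for comparison
--     process_name_lower = process_name.lower() if process_name else ""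
--
--     for critical in critical_names:
--         if critical in process_name_lower:
--             return True
--
--     return False
-- ===== SOURCE B (Python) =====
-- import re
--
-- _CRITICAL_NAMES = [
--     'systemd', 'kernel', 'kthreadd', 'init', 'explorer.exe', 'svchost.exe',
--     'wininit.exe', 'csrss.exe', 'lsass.exe', 'services.exe', 'dwm.exe',
--     'winlogon.exe', 'spoolsv.exe', 'taskhost.exe', 'smss.exe', 'csrss.exe'
-- ]
--
-- _CRITICAL_RE = re.compile('|'.join(re.escape(n) for n in _CRITICAL_NAMES))
--
--
-- def _is_system_critical_process(process_name: str) -> bool: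
--     """Check if a process is critical to system operation"""
--     lowered = process_name.lower() if process_name else ""
--     return bool(_CRITICAL_RE.search(lowered))
-- ===== Notes on version B (the rewrite author's own statement) =====
-- stated objective: idiomatic
-- what changed: Replaces the Python-level loop of 16 separate substring scans with one precompiled regex alternation searched in a single left-to-right pass over the string.
import Mathlib
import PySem

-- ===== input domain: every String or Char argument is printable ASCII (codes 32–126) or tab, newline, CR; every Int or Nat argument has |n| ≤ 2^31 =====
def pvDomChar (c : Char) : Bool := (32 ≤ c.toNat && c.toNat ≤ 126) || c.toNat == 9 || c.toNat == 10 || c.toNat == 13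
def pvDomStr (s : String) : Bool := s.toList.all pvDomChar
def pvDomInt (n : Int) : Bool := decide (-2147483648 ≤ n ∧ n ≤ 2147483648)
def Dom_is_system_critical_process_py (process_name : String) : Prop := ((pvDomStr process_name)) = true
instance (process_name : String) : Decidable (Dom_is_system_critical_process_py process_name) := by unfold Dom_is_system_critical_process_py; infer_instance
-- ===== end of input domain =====

-- B replaces A's loop of 16 separate substring scans by a single regex alternation
-- searched in one left-to-right pass; equivalence of the return value is proved on all inputs.

-- ===== PORT A =====
-- the critical_names list literal of A (duplicate 'csrss.exe' kept)
def pvCriticalNames : List String :=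
  ["systemd", "kernel", "kthreadd", "init", "explorer.exe", "svchost.exe",
   "wininit.exe", "csrss.exe", "lsass.exe", "services.exe", "dwm.exe",
   "winlogon.exe", "spoolsv.exe", "taskhost.exe", "smss.exe", "csrss.exe"]

-- A's for-loop: first name contained in the lowered string returns True, else False
def pvALoop : List String → List Char → Bool
  | [], _ => false
  | c :: rest, s => if PySem.Chars.isIn c.toList s then true else pvALoop rest s

def is_system_critical_process_py (process_name : String) : Bool :=
  let lowered := (if process_name == "" then "" else PySem.Str.lower process_name).toList
  pvALoop pvCriticalNames lowered

-- ===== PORT B =====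
-- Source B's compiled regex is a literal alternation: re.search tries each position of the
-- string left to right and at each position the alternatives in order; this port is
-- exact for such a regex (all alternatives are escaped literals).
def pvMatchHere (s : List Char) : Bool :=
  pvCriticalNames.any (fun c => PySem.Chars.startswith s c.toList)

def pvScan : List Char → Bool
  | [] => pvMatchHere []
  | c :: t => if pvMatchHere (c :: t) then true else pvScan t

def is_system_critical_process_py_alt (process_name : String) : Bool :=
  let lowered := (if process_name == "" then "" else PySem.Str.lower process_name).toList
  pvScan lowered

-- ===== PRECONDITION & SPEC =====
def Spec_is_system_critical_process_py (process_name : String) (out : Bool) : Prop := out = is_system_critical_process_py_alt process_name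
instance (process_name : String) (out : Bool) : Decidable (Spec_is_system_critical_process_py process_name out) := by unfold Spec_is_system_critical_process_py; infer_instance

-- ===== CLAIM (what is proved, stated in full; the proofs are below) =====
def Claim_equal_is_system_critical_process_py : Prop := ∀ (process_name : String), Dom_is_system_critical_process_py process_name → Spec_is_system_critical_process_py process_name (is_system_critical_process_py process_name)

-- ===== LEMMAS AND PROOFS =====

theorem pvALoop_iff (l : List String) (s : List Char) :
    pvALoop l s = true ↔ ∃ c ∈ l, c.toList <:+: s := by
  induction l with
  | nil => simp [pvALoop]
  | cons c rest ih =>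
    simp only [pvALoop]
    by_cases h : PySem.Chars.isIn c.toList s = true
    · simp [h, (PySem.Chars.isIn_iff_infix _ _).mp h]
    · have : ¬ c.toList <:+: s := fun hinf => h ((PySem.Chars.isIn_iff_infix _ _).mpr hinf)
      simp [h, ih, this]

theorem pvMatchHere_iff (s : List Char) :
    pvMatchHere s = true ↔ ∃ c ∈ pvCriticalNames, c.toList <+: s := by
  simp [pvMatchHere, List.any_eq_true, PySem.Chars.startswith_iff]

theorem pvScan_iff (s : List Char) :
    pvScan s = true ↔ ∃ t, t <:+ s ∧ ∃ c ∈ pvCriticalNames, c.toList <+: t := by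
  induction s with
  | nil =>
    simp only [pvScan, pvMatchHere_iff]
    constructor
    · rintro ⟨c, hc, hp⟩; exact ⟨[], List.suffix_rfl, c, hc, hp⟩
    · rintro ⟨t, ht, c, hc, hp⟩
      cases List.suffix_nil.mp ht
      exact ⟨c, hc, hp⟩
  | cons a t ih =>
    simp only [pvScan]
    by_cases h : pvMatchHere (a :: t) = true
    · simp only [h, if_true, true_iff]
      obtain ⟨c, hc, hp⟩ := (pvMatchHere_iff _).mp h
      exact ⟨a :: t, List.suffix_rfl, c, hc, hp⟩
    · have hf : pvMatchHere (a :: t) = false := Bool.eq_false_iff.mpr h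
      simp only [hf, Bool.false_eq_true, if_false, ih]
      constructor
      · rintro ⟨u, hu, hrest⟩; exact ⟨u, hu.trans (List.suffix_cons a t), hrest⟩
      · rintro ⟨u, hu, c, hc, hp⟩
        rcases (List.suffix_cons_iff).mp hu with rfl | hu'
        · exact absurd ((pvMatchHere_iff _).mpr ⟨c, hc, hp⟩) h
        · exact ⟨u, hu', c, hc, hp⟩

theorem pvALoop_eq_pvScan (s : List Char) : pvALoop pvCriticalNames s = pvScan s := by
  have h : pvALoop pvCriticalNames s = true ↔ pvScan s = true := by
    rw [pvALoop_iff, pvScan_iff]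
    constructor
    · rintro ⟨c, hc, hinf⟩
      obtain ⟨u, hpre, hsuf⟩ := List.infix_iff_prefix_suffix.mp hinf
      exact ⟨u, hsuf, c, hc, hpre⟩
    · rintro ⟨u, hsuf, c, hc, hpre⟩
      exact ⟨c, hc, List.infix_iff_prefix_suffix.mpr ⟨u, hpre, hsuf⟩⟩
  cases ha : pvALoop pvCriticalNames s <;> cases hb : pvScan s <;> simp_all

-- ===== VERDICT (by name: the statement is the Claim_ definition above) =====
theorem is_system_critical_process_py_spec : Claim_equal_is_system_critical_process_py := by
  intro pn _
  unfold Spec_is_system_critical_process_py is_system_critical_process_py is_system_critical_process_py_alt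
  exact pvALoop_eq_pvScan _
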